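-- pv_equiv track=rewrite | github.com/safarzadehsbeengood/pixelator | pixelator.py | summarize_block
-- ===== SOURCE A (Python) =====
-- def summarize_block(matrix, i, j, pixel_size):
--     sum_r, sum_g, sum_b = 0, 0, 0
--     for y in range(i, i+pixel_size):
--         for x in range(j, j+pixel_size):
--             sum_r += matrix[y][x][0]
--             sum_g += matrix[y][x][1]
--             sum_b += matrix[y][x][2]
--     return (sum_r//(pixel_size**2), sum_g//(pixel_size**2), sum_b//(pixel_size**2))
-- ===== SOURCE B (Python) =====
-- def summarize_block(matrix, i, j, pixel_size):
--     # Incremental square growth: the m x m block sum is the (m-1) x (m-1) block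
--     # sum plus the L-shaped border (bottom row of length m, right column of
--     # length m-1), so one pass over m = 1..pixel_size accumulates the block sum.
--     sums = (0, 0, 0)
--     for m in range(1, pixel_size + 1):
--         row = [matrix[i + m - 1][x] for x in range(j, j + m)]
--         col = [matrix[y][j + m - 1] for y in range(i, i + m - 1)]
--         for p in row + col:
--             sums = (sums[0] + p[0], sums[1] + p[1], sums[2] + p[2])
--     n = pixel_size ** 2
--     return (sums[0] // n, sums[1] // n, sums[2] // n)
-- ===== Notes on version B (the rewrite author's own statement) =====
-- stated objective: alternative
-- what changed: B computes the block sum by incremental square growth (S(m) = S(m-1) + the L-shaped border: bottom row plus right column), a single loop over the block size that visits the pixels in concentric-L order, instead of A's row-major nested index loops with three interleaved accumulators.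
import Mathlib
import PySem

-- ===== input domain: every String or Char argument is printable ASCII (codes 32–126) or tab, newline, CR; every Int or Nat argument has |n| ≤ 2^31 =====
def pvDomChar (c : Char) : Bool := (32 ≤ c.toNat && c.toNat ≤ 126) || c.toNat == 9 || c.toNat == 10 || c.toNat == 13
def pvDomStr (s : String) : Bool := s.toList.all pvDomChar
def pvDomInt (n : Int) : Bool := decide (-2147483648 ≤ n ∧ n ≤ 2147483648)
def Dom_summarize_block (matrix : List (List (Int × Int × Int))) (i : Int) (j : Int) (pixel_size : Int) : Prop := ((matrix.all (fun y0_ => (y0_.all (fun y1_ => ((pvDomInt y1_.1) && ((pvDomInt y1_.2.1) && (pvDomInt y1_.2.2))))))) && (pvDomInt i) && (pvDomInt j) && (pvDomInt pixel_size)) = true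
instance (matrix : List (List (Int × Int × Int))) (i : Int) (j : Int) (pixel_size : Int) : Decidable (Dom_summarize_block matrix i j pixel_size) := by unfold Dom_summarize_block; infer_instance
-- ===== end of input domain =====

-- B computes the block sum by incremental square growth (S(m) = S(m-1) + the bottom-row/right-column
-- L-shaped border), one loop over m, instead of A's row-major nested loops; objective: alternative.


-- ===== PORT A =====
def summarize_block (matrix : List (List (Int × Int × Int))) (i : Int) (j : Int) (pixel_size : Int) : Int × Int × Int :=
  let s := (PySem.List.pyRange i (i + pixel_size) 1).foldl (fun acc y =>
    (PySem.List.pyRange j (j + pixel_size) 1).foldl (fun acc2 x =>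
      let p := PySem.List.pyGetD (PySem.List.pyGetD matrix y []) x ((0:Int), (0:Int), (0:Int))
      (acc2.1 + p.1, acc2.2.1 + p.2.1, acc2.2.2 + p.2.2)) acc) ((0:Int), (0:Int), (0:Int))
  (PySem.Int.floordiv s.1 (pixel_size ^ 2),
   PySem.Int.floordiv s.2.1 (pixel_size ^ 2),
   PySem.Int.floordiv s.2.2 (pixel_size ^ 2))

-- ===== PORT B =====
def sbCell (matrix : List (List (Int × Int × Int))) (y x : Int) : Int × Int × Int :=
  PySem.List.pyGetD (PySem.List.pyGetD matrix y []) x ((0:Int), (0:Int), (0:Int))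

def summarize_block_alt (matrix : List (List (Int × Int × Int))) (i : Int) (j : Int) (pixel_size : Int) : Int × Int × Int :=
  let s := (PySem.List.pyRange 1 (pixel_size + 1) 1).foldl (fun acc m =>
    let row := (PySem.List.pyRange j (j + m) 1).map (fun x => sbCell matrix (i + m - 1) x)
    let col := (PySem.List.pyRange i (i + m - 1) 1).map (fun y => sbCell matrix y (j + m - 1))
    (row ++ col).foldl (fun a p => (a.1 + p.1, a.2.1 + p.2.1, a.2.2 + p.2.2)) acc)
    ((0:Int), (0:Int), (0:Int))
  let n := pixel_size ^ 2
  (PySem.Int.floordiv s.1 n, PySem.Int.floordiv s.2.1 n, PySem.Int.floordiv s.2.2 n)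

-- ===== PRECONDITION & SPEC =====
-- Pre_ excludes exactly the inputs where Python A raises: pixel_size = 0 (ZeroDivisionError from 0//0)
-- and, when pixel_size > 0, any block index matrix[y][x] outside Python's (negative-wrapping) range (IndexError).
def Pre_summarize_block (matrix : List (List (Int × Int × Int))) (i : Int) (j : Int) (pixel_size : Int) : Prop :=
  pixel_size ≠ 0 ∧
  (0 < pixel_size →
    -(matrix.length : Int) ≤ i ∧ i + pixel_size ≤ (matrix.length : Int) ∧
    ∀ y ∈ PySem.List.pyRange i (i + pixel_size) 1,
      -((PySem.List.pyGetD matrix y []).length : Int) ≤ j ∧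
      j + pixel_size ≤ ((PySem.List.pyGetD matrix y []).length : Int))
instance (matrix : List (List (Int × Int × Int))) (i : Int) (j : Int) (pixel_size : Int) : Decidable (Pre_summarize_block matrix i j pixel_size) := by unfold Pre_summarize_block; infer_instance

def pvWitness_summarize_block : (List (List (Int × Int × Int))) × Int × Int × Int :=
  ([[(1, 2, 3), (4, 5, 6)], [(7, 8, 9), (10, 11, 12)]], 0, 0, 2)

def Spec_summarize_block (matrix : List (List (Int × Int × Int))) (i : Int) (j : Int) (pixel_size : Int) (out : Int × Int × Int) : Prop := out = summarize_block_alt matrix i j pixel_size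
instance (matrix : List (List (Int × Int × Int))) (i : Int) (j : Int) (pixel_size : Int) (out : Int × Int × Int) : Decidable (Spec_summarize_block matrix i j pixel_size out) := by unfold Spec_summarize_block; infer_instance

-- ===== CLAIM (what is proved, stated in full; the proofs are below) =====
def Claim_equal_summarize_block : Prop := ∀ (matrix : List (List (Int × Int × Int))) (i : Int) (j : Int) (pixel_size : Int), Dom_summarize_block matrix i j pixel_size → Pre_summarize_block matrix i j pixel_size → Spec_summarize_block matrix i j pixel_size (summarize_block matrix i j pixel_size)

-- ===== LEMMAS AND PROOFS =====

-- The three-channel accumulating step over g x is addition in the product monoid.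
theorem foldl_addf {α : Type} (l : List α) (g : α → Int × Int × Int) (a : Int × Int × Int) :
    l.foldl (fun acc x => (acc.1 + (g x).1, acc.2.1 + (g x).2.1, acc.2.2 + (g x).2.2)) a
      = a + (l.map g).sum := by
  induction l generalizing a with
  | nil => simp
  | cons x l ih =>
    have hx : ((a.1 + (g x).1, a.2.1 + (g x).2.1, a.2.2 + (g x).2.2) : Int × Int × Int)
        = a + g x := rfl
    simp only [List.foldl_cons, hx, ih, List.map_cons, List.sum_cons]
    rw [add_assoc]

-- Folding an additive contribution over a list is the initial value plus the summed map.
theorem foldl_addg {α : Type} (l : List α) (g : α → Int × Int × Int) (a : Int × Int × Int) :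
    l.foldl (fun acc x => acc + g x) a = a + (l.map g).sum := by
  induction l generalizing a with
  | nil => simp
  | cons x l ih => simp only [List.foldl_cons, ih, List.map_cons, List.sum_cons]; rw [add_assoc]

-- Sums distribute over a pointwise-added map.
theorem sum_map_add3 {α : Type} (l : List α) (f g : α → Int × Int × Int) :
    (l.map (fun x => f x + g x)).sum = (l.map f).sum + (l.map g).sum := by
  induction l with
  | nil => simp
  | cons x l ih => simp [List.sum_cons, ih]; abel

-- Square sum equals the sum of concentric L-shaped borders (the heart of B's correctness).
theorem square_eq_Lshapes (cell : Int → Int → Int × Int × Int) (i j : Int) (n : Nat) :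
    ((PySem.List.pyRange i (i + n) 1).map (fun y =>
        ((PySem.List.pyRange j (j + n) 1).map (fun x => cell y x)).sum)).sum
      = ((PySem.List.pyRange 1 (1 + n) 1).map (fun m =>
          ((PySem.List.pyRange j (j + m) 1).map (fun x => cell (i + m - 1) x)).sum
            + ((PySem.List.pyRange i (i + m - 1) 1).map (fun y => cell y (j + m - 1))).sum)).sum := by
  induction n with
  | zero =>
    simp [PySem.List.pyRange_one_eq_nil]
  | succ n ih =>
    have hcast : ((n : Int) + 1) = ((n + 1 : Nat) : Int) := by push_cast; ring
    have hi : PySem.List.pyRange i (i + ((n + 1 : Nat) : Int)) 1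
        = PySem.List.pyRange i (i + n) 1 ++ [i + n] := by
      rw [← hcast, ← add_assoc, PySem.List.pyRange_one_succ_right (by omega)]
    have hj : PySem.List.pyRange j (j + ((n + 1 : Nat) : Int)) 1
        = PySem.List.pyRange j (j + n) 1 ++ [j + n] := by
      rw [← hcast, ← add_assoc, PySem.List.pyRange_one_succ_right (by omega)]
    have hm : PySem.List.pyRange 1 (1 + ((n + 1 : Nat) : Int)) 1
        = PySem.List.pyRange 1 (1 + n) 1 ++ [(1 + (n : Int))] := by
      rw [← hcast, ← add_assoc, PySem.List.pyRange_one_succ_right (by omega)]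
    rw [hi, hm]
    simp only [List.map_append, List.sum_append, List.map_cons, List.map_nil,
      List.sum_cons, List.sum_nil, add_zero]
    -- split the enlarged inner row of the old square rows
    have hsig : ((PySem.List.pyRange i (i + (n : Int)) 1).map (fun y =>
          ((PySem.List.pyRange j (j + ((n + 1 : Nat) : Int)) 1).map (fun x => cell y x)).sum)).sum
        = ((PySem.List.pyRange i (i + (n : Int)) 1).map (fun y =>
            ((PySem.List.pyRange j (j + (n : Int)) 1).map (fun x => cell y x)).sum)).sum
          + ((PySem.List.pyRange i (i + (n : Int)) 1).map (fun y => cell y (j + n))).sum := by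
      rw [hj, ← sum_map_add3]
      simp only [List.map_append, List.sum_append, List.map_cons, List.map_nil,
        List.sum_cons, List.sum_nil, add_zero]
    rw [hsig, ih]
    have e1 : (i + (1 + (n : Int)) - 1) = i + (n : Int) := by ring
    have e2 : (j + (1 + (n : Int)) - 1) = j + (n : Int) := by ring
    rw [e1, e2]
    have hj2 : PySem.List.pyRange j (j + (1 + (n : Int))) 1
        = PySem.List.pyRange j (j + n) 1 ++ [j + n] := by
      rw [show j + (1 + (n : Int)) = j + ((n + 1 : Nat) : Int) by push_cast; ring, hj]
    rw [hj2, hj]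
    simp only [List.map_append, List.sum_append, List.map_cons, List.map_nil,
      List.sum_cons, List.sum_nil, add_zero]
    ac_rfl

theorem summarize_block_spec : Claim_equal_summarize_block := by
  intro matrix i j k _ _
  show summarize_block matrix i j k = summarize_block_alt matrix i j k
  unfold summarize_block summarize_block_alt
  simp only []
  have hA : (PySem.List.pyRange i (i + k) 1).foldl (fun acc y =>
        (PySem.List.pyRange j (j + k) 1).foldl (fun acc2 x =>
          let p := PySem.List.pyGetD (PySem.List.pyGetD matrix y []) x ((0:Int), (0:Int), (0:Int))
          (acc2.1 + p.1, acc2.2.1 + p.2.1, acc2.2.2 + p.2.2)) acc) ((0:Int), (0:Int), (0:Int))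
      = ((PySem.List.pyRange i (i + k) 1).map (fun y =>
          ((PySem.List.pyRange j (j + k) 1).map (fun x => sbCell matrix y x)).sum)).sum := by
    have hin : ∀ (y : Int) (acc : Int × Int × Int),
        (PySem.List.pyRange j (j + k) 1).foldl (fun acc2 x =>
          let p := PySem.List.pyGetD (PySem.List.pyGetD matrix y []) x ((0:Int), (0:Int), (0:Int))
          (acc2.1 + p.1, acc2.2.1 + p.2.1, acc2.2.2 + p.2.2)) acc
        = acc + ((PySem.List.pyRange j (j + k) 1).map (fun x => sbCell matrix y x)).sum := by
      intro y acc
      exact foldl_addf _ (fun x => sbCell matrix y x) acc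
    simp only [hin]
    rw [foldl_addg]
    simp
  have hB : (PySem.List.pyRange 1 (k + 1) 1).foldl (fun acc m =>
        let row := (PySem.List.pyRange j (j + m) 1).map (fun x => sbCell matrix (i + m - 1) x)
        let col := (PySem.List.pyRange i (i + m - 1) 1).map (fun y => sbCell matrix y (j + m - 1))
        (row ++ col).foldl (fun a p => (a.1 + p.1, a.2.1 + p.2.1, a.2.2 + p.2.2)) acc)
        ((0:Int), (0:Int), (0:Int))
      = ((PySem.List.pyRange 1 (k + 1) 1).map (fun m =>
          ((PySem.List.pyRange j (j + m) 1).map (fun x => sbCell matrix (i + m - 1) x)).sum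
            + ((PySem.List.pyRange i (i + m - 1) 1).map (fun y => sbCell matrix y (j + m - 1))).sum)).sum := by
    have hin : ∀ (m : Int) (acc : Int × Int × Int),
        (((PySem.List.pyRange j (j + m) 1).map (fun x => sbCell matrix (i + m - 1) x))
          ++ ((PySem.List.pyRange i (i + m - 1) 1).map (fun y => sbCell matrix y (j + m - 1)))).foldl
            (fun a p => (a.1 + p.1, a.2.1 + p.2.1, a.2.2 + p.2.2)) acc
        = acc + (((PySem.List.pyRange j (j + m) 1).map (fun x => sbCell matrix (i + m - 1) x)).sum
            + ((PySem.List.pyRange i (i + m - 1) 1).map (fun y => sbCell matrix y (j + m - 1))).sum) := by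
      intro m acc
      rw [foldl_addf _ (fun p => p) acc]
      simp [Function.comp_def, List.sum_append]
    simp only [hin]
    rw [foldl_addg]
    simp
  rw [hA, hB]
  by_cases hk : k ≤ 0
  · rw [PySem.List.pyRange_one_eq_nil (show i + k ≤ i by omega),
        PySem.List.pyRange_one_eq_nil (show k + 1 ≤ (1:Int) by omega)]
    simp
  · have hkn : ((k.toNat : Nat) : Int) = k := Int.toNat_of_nonneg (by omega)
    have := square_eq_Lshapes (fun y x => sbCell matrix y x) i j k.toNat
    rw [hkn] at this
    rw [this, show (1 : Int) + k = k + 1 by ring]
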